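-- pv_equiv track=rewrite | github.com/PearlCoastal/Leetcode_Solutions_python3 | break_chain.py | break_chain
-- ===== SOURCE A (Python) =====
-- def break_chain(A: int) -> int:
--     length = len(A)
--     dp = [0]*(length-2)
--
--     for i in range(length-2):
--         dp[i]=A[i]+A[i+2]
--
--     for i in range(length-2):
--         for j in range(i+3, length):
--
--             curr = A[i] + A[j]
--
--             dp[i] = min(curr, dp[i])
--
--     return min(dp)
-- ===== SOURCE B (Python) =====
-- def break_chain(A: int) -> int:
--     # one backward pass with a running suffix minimum: best over i of A[i] + min(A[i+2:])
--     n = len(A)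
--     suff = A[n - 1]
--     best = A[n - 3] + suff
--     for i in range(n - 4, -1, -1):
--         suff = min(suff, A[i + 2])
--         best = min(best, A[i] + suff)
--     return best
-- ===== Notes on version B (the rewrite author's own statement) =====
-- stated objective: faster
-- what changed: Replaced the quadratic double loop (for each i, scan all j >= i+3) plus a dp array and final min() by a single backward pass that maintains a running suffix minimum and the best sum so far.
import Mathlib
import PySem

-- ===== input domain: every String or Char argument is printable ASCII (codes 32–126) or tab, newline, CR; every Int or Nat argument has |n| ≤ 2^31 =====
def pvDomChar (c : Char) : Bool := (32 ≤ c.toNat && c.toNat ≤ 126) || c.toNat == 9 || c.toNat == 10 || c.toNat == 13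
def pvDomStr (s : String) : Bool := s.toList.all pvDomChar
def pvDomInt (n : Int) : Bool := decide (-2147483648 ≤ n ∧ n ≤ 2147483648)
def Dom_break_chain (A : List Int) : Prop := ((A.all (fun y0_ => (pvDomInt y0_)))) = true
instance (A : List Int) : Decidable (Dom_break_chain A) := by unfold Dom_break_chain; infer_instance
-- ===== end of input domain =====

-- B replaces A's quadratic double loop by one backward pass with a running suffix minimum.

-- ===== PORT A =====
def break_chain (A : List Int) : Int :=
  let length : Int := A.length
  let dp : List Int := List.replicate (length - 2).toNat 0
  let dp := (PySem.List.pyRange 0 (length - 2) 1).foldl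
    (fun dp i => PySem.List.pySetD dp i (PySem.List.pyGetD A i 0 + PySem.List.pyGetD A (i + 2) 0)) dp
  let dp := (PySem.List.pyRange 0 (length - 2) 1).foldl
    (fun dp i =>
      (PySem.List.pyRange (i + 3) length 1).foldl
        (fun dp j =>
          let curr := PySem.List.pyGetD A i 0 + PySem.List.pyGetD A j 0
          PySem.List.pySetD dp i (min curr (PySem.List.pyGetD dp i 0))) dp) dp
  (PySem.List.min? dp (fun y => y)).getD 0

-- ===== PORT B =====
def break_chain_alt (A : List Int) : Int :=
  let n : Int := A.length
  let sb : Int × Int := (PySem.List.pyRange (n - 4) (-1) (-1)).foldl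
    (fun (sb : Int × Int) i =>
      let suff := min sb.1 (PySem.List.pyGetD A (i + 2) 0)
      (suff, min sb.2 (PySem.List.pyGetD A i 0 + suff)))
    (PySem.List.pyGetD A (n - 1) 0, PySem.List.pyGetD A (n - 3) 0 + PySem.List.pyGetD A (n - 1) 0)
  sb.2

-- ===== PRECONDITION & SPEC =====
-- Pre_ excludes only lists of fewer than three elements, on which A raises ValueError (min of the empty dp).
def Pre_break_chain (A : List Int) : Prop := 3 ≤ A.length
instance (A : List Int) : Decidable (Pre_break_chain A) := by unfold Pre_break_chain; infer_instance
def pvWitness_break_chain : List Int := [1, 2, 3]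
def Spec_break_chain (A : List Int) (out : Int) : Prop := out = break_chain_alt A
instance (A : List Int) (out : Int) : Decidable (Spec_break_chain A out) := by unfold Spec_break_chain; infer_instance

-- ===== CLAIM (what is proved, stated in full; the proofs are below) =====
def Claim_equal_break_chain : Prop := ∀ (A : List Int), Dom_break_chain A → Pre_break_chain A → Spec_break_chain A (break_chain A)

-- ===== LEMMAS AND PROOFS =====

-- min(A[k:]) for k < A.length
def sufMin (A : List Int) (k : Nat) : Int :=
  (A.drop (k + 1)).foldl min (PySem.List.pyGetD A (k : Int) 0)

-- A[i] + min(A[i+2:]), the value both programs minimise over i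
def pairVal (A : List Int) (i : Nat) : Int :=
  PySem.List.pyGetD A (i : Int) 0 + sufMin A (i + 2)

-- min-fold algebra
theorem min_foldl (l : List Int) (x y : Int) :
    l.foldl min (min x y) = min x (l.foldl min y) := by
  induction l generalizing y with
  | nil => rfl
  | cons a t ih => simpa [min_assoc] using ih (min y a)

theorem foldl_min_pull (l : List Int) (b x : Int) :
    l.foldl min (min b x) = min (l.foldl min b) x := by
  rw [min_comm b x, min_foldl, min_comm]

theorem foldl_min_absorb (l : List Int) (x : Int) (hx : x ∈ l) (y : Int) :
    l.foldl min (min y x) = l.foldl min y := by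
  induction l generalizing y with
  | nil => cases hx
  | cons a t ih =>
    rcases List.mem_cons.mp hx with h | h
    · subst h
      simp [List.foldl_cons]
    · simp only [List.foldl_cons]
      rw [show min (min y x) a = min (min y a) x by
            rw [min_assoc, min_comm x a, ← min_assoc]]
      exact ih h (min y a)

theorem foldl_min_self_absorb (l : List Int) (x : Int) :
    min (l.foldl min x) x = l.foldl min x := by
  have h := min_foldl l x x
  simp only [min_self] at h
  exact min_eq_left (by rw [h]; exact min_le_left x _)

-- distribute a constant summand out of the running min
theorem foldl_min_add (c : Int → Int) :
    ∀ (js : List Int) (x a : Int),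
    js.foldl (fun acc j => min (x + c j) acc) (x + a)
      = x + js.foldl (fun acc j => min acc (c j)) a := by
  intro js
  induction js with
  | nil => intro x a; rfl
  | cons j t ih =>
    intro x a
    simp only [List.foldl_cons]
    rw [show min (x + c j) (x + a) = x + min a (c j) by
          rw [min_comm a (c j)]; exact min_add_add_left x (c j) a]
    exact ih x (min a (c j))

-- first loop of A: filling dp by pySetD over range(m) is a map
theorem setloop (f : Int → Int) :
    ∀ (m : Nat) (init : List Int), m ≤ init.length →
    (PySem.List.pyRange 0 (m : Int) 1).foldl
        (fun dp i => PySem.List.pySetD dp i (f i)) init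
      = (List.range m).map (fun (k : Nat) => f (k : Int)) ++ init.drop m := by
  intro m
  induction m with
  | zero => intro init _; simp [PySem.List.pyRange_one_eq_nil]
  | succ m ih =>
    intro init hlen
    have hm : m < init.length := by omega
    have h1 : ((m + 1 : Nat) : Int) = (m : Int) + 1 := by push_cast; ring
    rw [h1, PySem.List.pyRange_one_succ_right (by positivity), List.foldl_append,
        ih init (by omega)]
    simp only [List.foldl_cons, List.foldl_nil, PySem.List.pySetD_natCast]
    rw [List.set_append_right _ _ (by simp), List.drop_eq_getElem_cons hm]
    simp only [List.length_map, List.length_range, Nat.sub_self, List.set_cons_zero]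
    rw [List.range_succ, List.map_append, List.append_assoc]
    rfl

-- inner loop of A at index i: repeated read-modify-write of dp[i] is one set
theorem innerloop (c : Int → Int) :
    ∀ (js : List Int) (dp : List Int) (i : Nat), i < dp.length →
    js.foldl (fun dp j =>
        PySem.List.pySetD dp (i : Int) (min (c j) (PySem.List.pyGetD dp (i : Int) 0))) dp
      = PySem.List.pySetD dp (i : Int)
          (js.foldl (fun acc j => min (c j) acc) (PySem.List.pyGetD dp (i : Int) 0)) := by
  intro js
  induction js with
  | nil =>
    intro dp i hi
    simp only [List.foldl_nil, PySem.List.pySetD_natCast, PySem.List.pyGetD_natCast, List.getD]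
    rw [List.getElem?_eq_getElem hi]
    simp
  | cons j js ih =>
    intro dp i hi
    simp only [List.foldl_cons]
    rw [ih _ i (by simp [PySem.List.pySetD_natCast, hi])]
    simp only [PySem.List.pySetD_natCast, PySem.List.pyGetD_natCast, List.getD, List.set_set]
    rw [List.getElem?_set_self (by simpa using hi)]
    rfl

-- second loop of A: each iteration touches only index i, so the whole loop is a map
theorem outerloop (c : Int → Int → Int) (G : Int → List Int) :
    ∀ (m : Nat) (init : List Int), m ≤ init.length →
    (PySem.List.pyRange 0 (m : Int) 1).foldl
        (fun dp i => (G i).foldl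
          (fun dp j => PySem.List.pySetD dp i (min (c i j) (PySem.List.pyGetD dp i 0))) dp) init
      = (List.range m).map (fun (k : Nat) => (G (k : Int)).foldl
          (fun acc j => min (c (k : Int) j) acc) (PySem.List.pyGetD init (k : Int) 0))
        ++ init.drop m := by
  intro m
  induction m with
  | zero => intro init _; simp [PySem.List.pyRange_one_eq_nil]
  | succ m ih =>
    intro init hlen
    have hm : m < init.length := by omega
    have h1 : ((m + 1 : Nat) : Int) = (m : Int) + 1 := by push_cast; ring
    rw [h1, PySem.List.pyRange_one_succ_right (by positivity), List.foldl_append,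
        ih init (by omega)]
    simp only [List.foldl_cons, List.foldl_nil]
    rw [innerloop (c (m : Int)) (G (m : Int)) _ m (by simp; omega)]
    have hmapslen : ((List.range m).map (fun (k : Nat) => (G (k : Int)).foldl
          (fun acc j => min (c (k : Int) j) acc) (PySem.List.pyGetD init (k : Int) 0))).length = m := by
      simp
    have hget : PySem.List.pyGetD
        ((List.range m).map (fun (k : Nat) => (G (k : Int)).foldl
          (fun acc j => min (c (k : Int) j) acc) (PySem.List.pyGetD init (k : Int) 0))
         ++ init.drop m) (m : Int) 0 = PySem.List.pyGetD init (m : Int) 0 := by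
      rw [PySem.List.pyGetD_natCast, PySem.List.pyGetD_natCast]
      simp only [List.getD]
      rw [List.getElem?_append_right (le_of_eq hmapslen), hmapslen, Nat.sub_self]
      simp [List.getElem?_drop, List.getElem?_eq_getElem hm]
    rw [hget, PySem.List.pySetD_natCast,
        List.set_append_right _ _ (by simp), List.drop_eq_getElem_cons hm]
    simp only [List.length_map, List.length_range, Nat.sub_self, List.set_cons_zero]
    rw [List.range_succ, List.map_append, List.append_assoc]
    rfl

-- B's backward loop: invariant suff = sufMin(i+3) entering iteration i
theorem Bfold (A : List Int) :
    ∀ (k : Nat) (b : Int), k + 3 ≤ A.length →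
    ((PySem.List.pyRange ((k : Int) - 1) (-1) (-1)).foldl
       (fun (sb : Int × Int) i =>
          (min sb.1 (PySem.List.pyGetD A (i + 2) 0),
           min sb.2 (PySem.List.pyGetD A i 0 + min sb.1 (PySem.List.pyGetD A (i + 2) 0))))
       (sufMin A (k + 2), b)).2
    = ((List.range k).map (fun i => pairVal A i)).foldl min b := by
  intro k
  induction k with
  | zero =>
    intro b _
    rw [PySem.List.pyRange_neg_one_eq_nil (by norm_num)]
    simp
  | succ k ih =>
    intro b hk
    have hk3 : k + 3 < A.length := by omega
    have h1 : ((k + 1 : Nat) : Int) - 1 = (k : Int) := by push_cast; ring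
    rw [h1, PySem.List.pyRange_neg_one_cons (by omega)]
    simp only [List.foldl_cons]
    have hsuff : min (sufMin A (k + 1 + 2)) (PySem.List.pyGetD A ((k : Int) + 2) 0)
        = sufMin A (k + 2) := by
      have hg : PySem.List.pyGetD A ((k + 3 : Nat) : Int) 0 = A[k + 3] := by
        rw [PySem.List.pyGetD_natCast]
        exact List.getD_eq_getElem A 0 hk3
      unfold sufMin
      rw [show k + 1 + 2 + 1 = k + 3 + 1 by omega,
          show ((k : Int) + 2) = ((k + 2 : Nat) : Int) by push_cast; ring,
          show ((k + 1 + 2 : Nat) : Int) = ((k + 3 : Nat) : Int) by push_cast; ring,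
          show k + 2 + 1 = k + 3 by omega, List.drop_eq_getElem_cons hk3]
      simp only [List.foldl_cons]
      rw [hg, min_comm, min_foldl]
    simp only [hsuff]
    rw [ih (min b (PySem.List.pyGetD A (k : Int) 0 + sufMin A (k + 2))) (by omega)]
    have hpv : PySem.List.pyGetD A (k : Int) 0 + sufMin A (k + 2) = pairVal A k := rfl
    rw [hpv, foldl_min_pull, List.range_succ, List.map_append, List.foldl_append]
    rfl

-- reordering glue: a min-fold over all of pairVal 0..q, seeded differently on each side
theorem final_glue (P : Nat → Int) (q : Nat) :
    ((List.range q).map (fun k => P (k + 1))).foldl min (P 0)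
      = ((List.range q).map P).foldl min (P q) := by
  have hL0 : (List.range (q + 1)).map P = P 0 :: (List.range q).map (fun k => P (k + 1)) := by
    rw [List.range_succ_eq_map, List.map_cons, List.map_map]
    rfl
  have hL1 : (List.range (q + 1)).map P = (List.range q).map P ++ [P q] := by
    rw [List.range_succ, List.map_append]
    rfl
  have m0 : P 0 ∈ (List.range (q + 1)).map P := by rw [hL0]; exact List.mem_cons_self ..
  have mq : P q ∈ (List.range (q + 1)).map P := by rw [hL1]; simp
  have e0 : ((List.range (q + 1)).map P).foldl min (P 0)
      = ((List.range q).map (fun k => P (k + 1))).foldl min (P 0) := by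
    rw [hL0]; simp [List.foldl_cons]
  have e1 : ((List.range (q + 1)).map P).foldl min (P q)
      = ((List.range q).map P).foldl min (P q) := by
    rw [hL1, List.foldl_append]
    simp only [List.foldl_cons, List.foldl_nil]
    exact foldl_min_self_absorb _ _
  have h01 : ((List.range (q + 1)).map P).foldl min (P 0)
      = ((List.range (q + 1)).map P).foldl min (P q) := by
    rw [← foldl_min_absorb _ _ mq (P 0), min_comm, foldl_min_absorb _ _ m0 (P q)]
  rw [← e0, h01, e1]

theorem break_chain_eq (A : List Int) (h : 3 ≤ A.length) :
    break_chain A = break_chain_alt A := by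
  obtain ⟨q, hq⟩ : ∃ q, A.length = q + 3 := ⟨A.length - 3, by omega⟩
  have hc2 : ((A.length : Int) - 2) = ((q + 1 : Nat) : Int) := by rw [hq]; push_cast; ring
  have htn : ((q + 1 : Nat) : Int).toNat = q + 1 := by omega
  have hc4 : ((A.length : Int) - 4) = ((q : Nat) : Int) - 1 := by rw [hq]; push_cast; ring
  have hc1 : ((A.length : Int) - 1) = ((q + 2 : Nat) : Int) := by rw [hq]; push_cast; ring
  have hc3 : ((A.length : Int) - 3) = ((q : Nat) : Int) := by rw [hq]; push_cast; ring
  -- the A side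
  have hval : ∀ k, k < q + 1 →
      PySem.List.pyGetD ((List.range (q + 1)).map
        (fun (k : Nat) => PySem.List.pyGetD A (k : Int) 0 + PySem.List.pyGetD A ((k : Int) + 2) 0))
        (k : Int) 0
      = PySem.List.pyGetD A (k : Int) 0 + PySem.List.pyGetD A ((k : Int) + 2) 0 := by
    intro k hk
    rw [PySem.List.pyGetD_natCast, List.getD_eq_getElem _ _ (by simpa using hk)]
    simp
  have hmap : ∀ k, k < q + 1 →
      (PySem.List.pyRange ((k : Int) + 3) (A.length : Int) 1).foldl
        (fun acc j => min (PySem.List.pyGetD A (k : Int) 0 + PySem.List.pyGetD A j 0) acc)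
        (PySem.List.pyGetD A (k : Int) 0 + PySem.List.pyGetD A ((k : Int) + 2) 0)
      = pairVal A k := by
    intro k hk
    rw [foldl_min_add (fun j => PySem.List.pyGetD A j 0)]
    rw [show ((k : Int) + 3) = ((k + 3 : Nat) : Int) by push_cast; ring]
    rw [PySem.List.foldl_pyRange_pyGetD' A 0 min _ (by omega)]
    rw [show ((k + 3 : Nat) : Int).toNat = k + 2 + 1 by omega]
    rw [show ((k : Int) + 2) = ((k + 2 : Nat) : Int) by push_cast; ring]
    rfl
  have hA : break_chain A
      = ((List.range q).map (fun k => pairVal A (k + 1))).foldl min (pairVal A 0) := by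
    simp only [break_chain]
    simp only [hc2, htn]
    rw [setloop (fun i => PySem.List.pyGetD A i 0 + PySem.List.pyGetD A (i + 2) 0)
          (q + 1) _ (by simp)]
    simp only [List.drop_replicate, Nat.sub_self, List.replicate_zero, List.append_nil]
    rw [outerloop (fun i j => PySem.List.pyGetD A i 0 + PySem.List.pyGetD A j 0)
          (fun i => PySem.List.pyRange (i + 3) (A.length : Int) 1) (q + 1) _ (by simp)]
    rw [List.drop_eq_nil_of_le (by simp), List.append_nil]
    have hcongr : (List.range (q + 1)).map (fun (k : Nat) =>
          (PySem.List.pyRange ((k : Int) + 3) (A.length : Int) 1).foldl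
            (fun acc j => min (PySem.List.pyGetD A (k : Int) 0 + PySem.List.pyGetD A j 0) acc)
            (PySem.List.pyGetD ((List.range (q + 1)).map
              (fun (k : Nat) => PySem.List.pyGetD A (k : Int) 0 + PySem.List.pyGetD A ((k : Int) + 2) 0))
              (k : Int) 0))
        = (List.range (q + 1)).map (fun k => pairVal A k) := by
      refine List.map_congr_left ?_
      intro k hk
      rw [hval k (List.mem_range.mp hk)]
      exact hmap k (List.mem_range.mp hk)
    rw [hcongr]
    rw [List.range_succ_eq_map, List.map_cons, List.map_map, PySem.List.min?_id_cons]
    simp only [Option.getD_some]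
    rw [show (fun k => pairVal A k) ∘ Nat.succ = fun k => pairVal A (k + 1) from funext fun k => rfl]
  -- the B side
  have hsufq : sufMin A (q + 2) = PySem.List.pyGetD A ((q + 2 : Nat) : Int) 0 := by
    unfold sufMin
    rw [show q + 2 + 1 = A.length by omega, List.drop_length]
    rfl
  have hB : break_chain_alt A
      = ((List.range q).map (fun i => pairVal A i)).foldl min (pairVal A q) := by
    simp only [break_chain_alt]
    simp only [hc4, hc1, hc3]
    rw [show (PySem.List.pyGetD A ((q + 2 : Nat) : Int) 0,
          PySem.List.pyGetD A ((q : Nat) : Int) 0 + PySem.List.pyGetD A ((q + 2 : Nat) : Int) 0)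
        = (sufMin A (q + 2), pairVal A q) by rw [← hsufq]; rfl]
    exact Bfold A q (pairVal A q) (by omega)
  rw [hA, hB]
  exact final_glue (fun i => pairVal A i) q

-- ===== VERDICT (by name: the statement is the Claim_ definition above) =====
theorem break_chain_spec : Claim_equal_break_chain := by
  intro A _ hpre
  unfold Spec_break_chain
  exact break_chain_eq A hpre
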